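-- pv_equiv track=rewrite | github.com/TimPlay1/robloxcheatztg | bot.py | find_exploit_in_weao
-- ===== SOURCE A (Python) =====
-- from typing import Optional, Dict, List
--
-- def find_exploit_in_weao(exploits: List, api_name: str) -> dict:
--     """Find exploit in WEAO data by apiName"""
--     if not exploits:
--         return None
--
--     api_name_lower = api_name.lower().replace(" ", "").replace(".", "")
--
--     # Exact match by title
--     for exploit in exploits:
--         if exploit.get("title", "").lower() == api_name.lower():
--             return exploit
--
--     # Normalized match
--     for exploit in exploits:
--         title_norm = exploit.get("title", "").lower().replace(" ", "").replace(".", "")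
--         if title_norm == api_name_lower:
--             return exploit
--
--     # Partial match
--     for exploit in exploits:
--         title_norm = exploit.get("title", "").lower().replace(" ", "").replace(".", "")
--         if api_name_lower in title_norm or title_norm in api_name_lower:
--             return exploit
--
--     return None
-- ===== SOURCE B (Python) =====
-- def find_exploit_in_weao(exploits, api_name):
--     """Find exploit in WEAO data by apiName (single pass over exploits)."""
--     if not exploits:
--         return None
--
--     target_lower = api_name.lower()
--     target_norm = target_lower.replace(" ", "").replace(".", "")
--
--     norm_hit = None
--     partial_hit = None
--     for exploit in exploits:
--         title_lower = exploit.get("title", "").lower()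
--         if title_lower == target_lower:
--             return exploit  # exact match wins immediately
--         title_norm = title_lower.replace(" ", "").replace(".", "")
--         if title_norm == target_norm:
--             if norm_hit is None:
--                 norm_hit = exploit
--         elif (target_norm in title_norm or title_norm in target_norm) and partial_hit is None:
--             partial_hit = exploit
--
--     return norm_hit if norm_hit is not None else partial_hit
-- ===== Notes on version B (the rewrite author's own statement) =====
-- stated objective: faster
-- what changed: Replaces A's three sequential full scans (exact, normalized, partial) by a single loop that normalizes each title once, returns immediately on an exact match and keeps the first normalized and first partial candidates for the end.
import Mathlib
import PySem

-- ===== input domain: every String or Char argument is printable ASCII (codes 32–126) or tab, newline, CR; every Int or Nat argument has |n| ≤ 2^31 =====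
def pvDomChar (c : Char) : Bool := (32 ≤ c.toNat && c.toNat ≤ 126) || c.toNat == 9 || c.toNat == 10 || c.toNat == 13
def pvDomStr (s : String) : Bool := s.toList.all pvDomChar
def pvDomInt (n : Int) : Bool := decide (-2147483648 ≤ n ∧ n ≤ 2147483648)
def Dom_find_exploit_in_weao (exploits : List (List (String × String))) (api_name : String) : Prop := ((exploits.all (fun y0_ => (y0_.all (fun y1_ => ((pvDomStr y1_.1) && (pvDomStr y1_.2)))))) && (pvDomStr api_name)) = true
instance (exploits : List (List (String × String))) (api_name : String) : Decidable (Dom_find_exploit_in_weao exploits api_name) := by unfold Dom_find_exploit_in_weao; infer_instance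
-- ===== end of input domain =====

-- B replaces A's three sequential scans by one loop keeping first normalized/partial candidates; same return value.
-- ===== PORT A =====
def pvTitle (e : List (String × String)) : String :=
  PySem.Dict.getD (PySem.Dict.mk e) "title" ""

def pvNorm (s : String) : String :=
  PySem.Str.replace (PySem.Str.replace s " " "") "." ""

def find_exploit_in_weao (exploits : List (List (String × String))) (api_name : String) : Option (List (String × String)) :=
  if exploits = [] then none else
  let api_name_lower := pvNorm (PySem.Str.lower api_name)
  -- Exact match by title
  match exploits.find? (fun e => PySem.Str.lower (pvTitle e) == PySem.Str.lower api_name) with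
  | some e => some e
  | none =>
    -- Normalized match
    match exploits.find? (fun e => pvNorm (PySem.Str.lower (pvTitle e)) == api_name_lower) with
    | some e => some e
    | none =>
      -- Partial match
      match exploits.find? (fun e =>
          let title_norm := pvNorm (PySem.Str.lower (pvTitle e))
          PySem.Str.isIn api_name_lower title_norm || PySem.Str.isIn title_norm api_name_lower) with
      | some e => some e
      | none => none

-- ===== PORT B =====
def find_exploit_in_weao_alt_go (tl tn : String) :
    List (List (String × String)) → Option (List (String × String)) → Option (List (String × String)) → Option (List (String × String))
  | [], nh, ph => match nh with | some e => some e | none => ph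
  | e :: rest, nh, ph =>
    let title_lower := PySem.Str.lower (pvTitle e)
    if title_lower == tl then some e
    else
      let title_norm := pvNorm title_lower
      if title_norm == tn then
        find_exploit_in_weao_alt_go tl tn rest (if nh.isNone then some e else nh) ph
      else if (PySem.Str.isIn tn title_norm || PySem.Str.isIn title_norm tn) && ph.isNone then
        find_exploit_in_weao_alt_go tl tn rest nh (some e)
      else
        find_exploit_in_weao_alt_go tl tn rest nh ph

def find_exploit_in_weao_alt (exploits : List (List (String × String))) (api_name : String) : Option (List (String × String)) :=
  if exploits = [] then none else
  let target_lower := PySem.Str.lower api_name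
  find_exploit_in_weao_alt_go target_lower (pvNorm target_lower) exploits none none

-- ===== PRECONDITION & SPEC =====
def Spec_find_exploit_in_weao (exploits : List (List (String × String))) (api_name : String) (out : Option (List (String × String))) : Prop := out = find_exploit_in_weao_alt exploits api_name
instance (exploits : List (List (String × String))) (api_name : String) (out : Option (List (String × String))) : Decidable (Spec_find_exploit_in_weao exploits api_name out) := by unfold Spec_find_exploit_in_weao; infer_instance

-- ===== CLAIM (what is proved, stated in full; the proofs are below) =====
def Claim_equal_find_exploit_in_weao : Prop := ∀ (exploits : List (List (String × String))) (api_name : String), Dom_find_exploit_in_weao exploits api_name → Spec_find_exploit_in_weao exploits api_name (find_exploit_in_weao exploits api_name)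

-- ===== LEMMAS AND PROOFS =====

-- ===== VERDICT (by name: the statement is the Claim_ definition above) =====
lemma go_eq (tl tn : String) (l : List (List (String × String))) :
    ∀ (nh ph : Option (List (String × String))),
    find_exploit_in_weao_alt_go tl tn l nh ph =
      match l.find? (fun e => PySem.Str.lower (pvTitle e) == tl) with
      | some e => some e
      | none =>
        ((nh.orElse (fun _ => l.find? (fun e => pvNorm (PySem.Str.lower (pvTitle e)) == tn))).orElse
          (fun _ => ph.orElse (fun _ => l.find? (fun e =>
              let s := pvNorm (PySem.Str.lower (pvTitle e))
              PySem.Str.isIn tn s || PySem.Str.isIn s tn)))) := by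
  induction l with
  | nil => intro nh ph; cases nh <;> cases ph <;> simp [find_exploit_in_weao_alt_go, Option.orElse]
  | cons e rest ih =>
    intro nh ph
    simp only [find_exploit_in_weao_alt_go, List.find?]
    by_cases hE : (PySem.Str.lower (pvTitle e) == tl) = true
    · simp [hE]
    · simp only [hE, Bool.false_eq_true, if_false]
      by_cases hN : (pvNorm (PySem.Str.lower (pvTitle e)) == tn) = true
      · simp only [hN, if_true]
        rw [ih]
        cases nh <;> cases ph <;> simp [Option.orElse]
      · simp only [hN, Bool.false_eq_true, if_false]
        by_cases hP : (PySem.Str.isIn tn (pvNorm (PySem.Str.lower (pvTitle e))) ||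
            PySem.Str.isIn (pvNorm (PySem.Str.lower (pvTitle e))) tn) = true
        · cases ph with
          | none =>
            simp only [hP, Option.isNone_none, Bool.and_true, if_true]
            rw [ih]
            cases nh <;> simp [Option.orElse]
          | some q =>
            simp only [Option.isNone_some, Bool.and_false, Bool.false_eq_true, if_false]
            rw [ih]
            cases nh <;> simp [Option.orElse]
        · simp only [Bool.and_eq_true, hP, false_and, Bool.false_eq_true, if_false]
          rw [ih]

theorem find_exploit_in_weao_spec : Claim_equal_find_exploit_in_weao := by
  intro exploits api_name _
  unfold Spec_find_exploit_in_weao find_exploit_in_weao find_exploit_in_weao_alt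
  by_cases h : exploits = []
  · simp [h]
  · simp only [h, if_false]
    rw [go_eq]
    cases h1 : exploits.find? (fun e => PySem.Str.lower (pvTitle e) == PySem.Str.lower api_name) with
    | some e => simp
    | none =>
      cases h2 : exploits.find? (fun e => pvNorm (PySem.Str.lower (pvTitle e)) == pvNorm (PySem.Str.lower api_name)) with
      | some e => simp [Option.orElse]
      | none =>
        cases h3 : exploits.find? (fun e =>
            let s := pvNorm (PySem.Str.lower (pvTitle e))
            PySem.Str.isIn (pvNorm (PySem.Str.lower api_name)) s || PySem.Str.isIn s (pvNorm (PySem.Str.lower api_name))) with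
        | some e => simp [Option.orElse]
        | none => simp [Option.orElse]
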